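-- pv_equiv track=rewrite | github.com/luciuskwok/atari-gunshy | tools/png_to_tileset.py | characterData
-- ===== SOURCE A (Python) =====
-- def characterData(packedData):
-- 	chars = []
-- 	charCount = int(len(packedData)/8)
-- 	for charIndex in range(0, charCount):
-- 		charUnit = []
-- 		for y in range(0, 8):
-- 			c = packedData[charIndex + y * charCount]
-- 			charUnit.append(c)
-- 		chars.append(charUnit)
-- 	return chars
-- ===== SOURCE B (Python) =====
-- def characterData(packedData):
-- 	charCount = len(packedData) // 8
-- 	chars = [[] for _ in range(charCount)]
-- 	for idx in range(8 * charCount):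
-- 		chars[idx % charCount].append(packedData[idx])
-- 	return chars
-- ===== Notes on version B (the rewrite author's own statement) =====
-- stated objective: alternative
-- what changed: Replaces A's per-character strided gather (nested loops indexing charIndex + y*charCount) with a single linear pass over the buffer in its natural order that scatters each byte into a pre-allocated per-character list at index idx % charCount.
import Mathlib
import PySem

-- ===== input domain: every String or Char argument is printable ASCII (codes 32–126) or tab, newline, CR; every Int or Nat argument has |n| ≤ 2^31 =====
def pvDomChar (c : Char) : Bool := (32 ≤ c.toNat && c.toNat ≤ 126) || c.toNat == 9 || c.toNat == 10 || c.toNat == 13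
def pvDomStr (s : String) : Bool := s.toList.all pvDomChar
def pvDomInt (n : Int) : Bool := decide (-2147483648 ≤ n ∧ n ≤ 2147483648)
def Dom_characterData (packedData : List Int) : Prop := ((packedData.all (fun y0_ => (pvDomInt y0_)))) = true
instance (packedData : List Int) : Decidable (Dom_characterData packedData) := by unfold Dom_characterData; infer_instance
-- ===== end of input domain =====

-- B replaces A's per-character strided gather (nested loops) with one linear scatter pass over the buffer (objective: alternative decomposition, same cost).

-- ===== PORT A =====
-- int(len(packedData)/8) on a nonnegative int equals floor division len // 8 (float division by a power
-- of two is exact), ported as PySem.Int.floordiv.  The index charIndex + y*charCount always lies in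
-- [0, len), so pyGetD with default 0 is exact (the default is never used).
def characterData (packedData : List Int) : List (List Int) :=
  let charCount : Int := PySem.Int.floordiv (packedData.length : Int) 8
  (PySem.List.pyRange 0 charCount 1).foldl
    (fun chars charIndex =>
      chars ++ [(PySem.List.pyRange 0 8 1).foldl
        (fun charUnit y => charUnit ++ [PySem.List.pyGetD packedData (charIndex + y * charCount) 0]) []])
    []

-- ===== PORT B =====
-- 'chars[idx % charCount].append(x)' mutates the list at the nonnegative in-range index idx % charCount,
-- ported as List.modify at (idx % charCount).toNat; packedData[idx] is in range, so pyGetD is exact.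
def characterData_alt (packedData : List Int) : List (List Int) :=
  let charCount : Int := PySem.Int.floordiv (packedData.length : Int) 8
  let chars : List (List Int) := (PySem.List.pyRange 0 charCount 1).map (fun _ => [])
  (PySem.List.pyRange 0 (8 * charCount) 1).foldl
    (fun chars idx =>
      chars.modify (PySem.Int.mod idx charCount).toNat (fun l => l ++ [PySem.List.pyGetD packedData idx 0]))
    chars

-- ===== PRECONDITION & SPEC =====
def Spec_characterData (packedData : List Int) (out : List (List Int)) : Prop := out = characterData_alt packedData
instance (packedData : List Int) (out : List (List Int)) : Decidable (Spec_characterData packedData out) := by unfold Spec_characterData; infer_instance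

-- ===== CLAIM (what is proved, stated in full; the proofs are below) =====
def Claim_equal_characterData : Prop := ∀ (packedData : List Int), Dom_characterData packedData → Spec_characterData packedData (characterData packedData)

-- ===== LEMMAS AND PROOFS =====

-- Common normal form: chars[i] = [xs[i + y*c] for y in range(k)], all indices over Int ranges.
def pvTarget (xs : List Int) (c k : ℤ) : List (List Int) :=
  (PySem.List.pyRange 0 c 1).map (fun i =>
    (PySem.List.pyRange 0 k 1).map (fun y => PySem.List.pyGetD xs (i + y * c) 0))

theorem pv_foldl_push {α β : Type} (f : α → β) :
    ∀ (l : List α) (init : List β), l.foldl (fun acc x => acc ++ [f x]) init = init ++ l.map f := by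
  intro l
  induction l with
  | nil => simp
  | cons x xs ih => intro init; simp [List.foldl, ih]

theorem pv_A_eq_target (xs : List Int) :
    characterData xs = pvTarget xs (PySem.Int.floordiv (xs.length : Int) 8) 8 := by
  unfold characterData pvTarget
  dsimp only
  rw [pv_foldl_push, List.nil_append]
  apply List.map_congr_left
  intro i _
  rw [pv_foldl_push, List.nil_append]

-- Scattering one row of n consecutive flat indices [k*c+j, k*c+c) appends xs[k*c+i] to chars[i] for j ≤ i < c.
theorem pv_row (xs : List Int) (c k : ℤ) :
    ∀ (d : ℕ) (j : ℤ), 0 ≤ j → j + d = c → ∀ (S : List (List Int)), S.length = c.toNat →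
    (PySem.List.pyRange (k * c + j) (k * c + c) 1).foldl
      (fun chars idx =>
        chars.modify (PySem.Int.mod idx c).toNat (fun l => l ++ [PySem.List.pyGetD xs idx 0])) S
    = S.mapIdx (fun i l => if j.toNat ≤ i then l ++ [PySem.List.pyGetD xs (k * c + (i : ℤ)) 0] else l) := by
  intro d
  induction d with
  | zero =>
    intro j hj hjc S hS
    have hjc' : j = c := by omega
    rw [PySem.List.pyRange_one_eq_nil (by omega)]
    simp only [List.foldl_nil]
    apply List.ext_getElem (by simp)
    intro i h1 h2
    rw [List.getElem_mapIdx]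
    have : ¬ j.toNat ≤ i := by
      rw [hS] at h1; omega
    simp [this]
  | succ d ih =>
    intro j hj hjc S hS
    have hc : 0 < c := by omega
    have hjlt : j < c := by omega
    rw [PySem.List.pyRange_one_cons (by omega), List.foldl_cons]
    have hmod : PySem.Int.mod (k * c + j) c = j := by
      rw [PySem.Int.mod_eq_emod_of_pos hc]
      have h1 : k * c + j = j + c * k := by ring
      rw [h1, Int.add_mul_emod_self_left]
      exact Int.emod_eq_of_lt hj hjlt
    rw [hmod]
    have harg : k * c + j + 1 = k * c + (j + 1) := by ring
    rw [harg, ih (j + 1) (by omega) (by omega) _ (by rw [List.length_modify, hS])]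
    apply List.ext_getElem (by simp)
    intro i h1 h2
    have hi : i < c.toNat := by
      rw [List.length_mapIdx, List.length_modify, hS] at h1; omega
    rw [List.getElem_mapIdx, List.getElem_mapIdx, List.getElem_modify]
    by_cases hij : j.toNat = i
    · have h1' : ¬ (j + 1).toNat ≤ i := by omega
      have : (i : ℤ) = j := by omega
      simp [hij, h1', this]
    · by_cases hle : j.toNat ≤ i
      · have : (j + 1).toNat ≤ i := by omega
        simp [hij, this, hle]
      · have : ¬ (j + 1).toNat ≤ i := by omega
        simp [hij, this, hle]

-- B's single scatter pass over k full rows builds the per-character lists of the common normal form.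
theorem pv_scatter (xs : List Int) (c : ℤ) (hc : 0 ≤ c) :
    ∀ (k : ℕ),
    (PySem.List.pyRange 0 ((k : ℤ) * c) 1).foldl
      (fun chars idx =>
        chars.modify (PySem.Int.mod idx c).toNat (fun l => l ++ [PySem.List.pyGetD xs idx 0]))
      ((PySem.List.pyRange 0 c 1).map (fun _ => []))
    = pvTarget xs c (k : ℤ) := by
  intro k
  induction k with
  | zero =>
    unfold pvTarget
    rw [Nat.cast_zero, zero_mul, PySem.List.pyRange_one_eq_nil (le_refl 0)]
    simp
  | succ k ih =>
    have hsplit : PySem.List.pyRange 0 (((k : ℤ) + 1) * c) 1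
        = PySem.List.pyRange 0 ((k : ℤ) * c) 1 ++ PySem.List.pyRange ((k : ℤ) * c + 0) ((k : ℤ) * c + c) 1 := by
      have h1 : (0 : ℤ) ≤ (k : ℤ) * c := by positivity
      have := PySem.List.pyRange_one_append 0 ((k : ℤ) * c) (((k : ℤ) + 1) * c) h1 (by nlinarith)
      rw [this]; congr 1; ring_nf
    push_cast
    rw [hsplit, List.foldl_append, ih,
      pv_row xs c (k : ℤ) c.toNat 0 (le_refl 0) (by omega) _ (by simp [pvTarget, PySem.List.length_pyRange_one])]
    apply List.ext_getElem (by simp [pvTarget])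
    intro i h1 h2
    have hi : i < c.toNat := by
      simp [pvTarget, PySem.List.length_pyRange_one] at h1; omega
    rw [List.getElem_mapIdx]
    simp only [pvTarget, List.getElem_map, PySem.List.getElem_pyRange_one]
    rw [PySem.List.pyRange_one_succ_right (by omega), List.map_append]
    simp only [Int.toNat_zero, Nat.zero_le, if_true, List.map_cons, List.map_nil]
    have : (0 : ℤ) + ↑i + ↑k * c = ↑k * c + ↑i := by ring
    rw [this]

theorem pv_B_eq_target (xs : List Int) :
    characterData_alt xs = pvTarget xs (PySem.Int.floordiv (xs.length : Int) 8) 8 := by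
  unfold characterData_alt
  dsimp only
  have hc0 : 0 ≤ PySem.Int.floordiv (xs.length : Int) 8 := by
    have h := PySem.Int.floordiv_natCast xs.length 8
    push_cast at h
    rw [h]
    positivity
  have h8 : (8 : ℤ) * PySem.Int.floordiv (xs.length : Int) 8
      = ((8 : ℕ) : ℤ) * PySem.Int.floordiv (xs.length : Int) 8 := by norm_num
  rw [h8, pv_scatter xs _ hc0 8]
  norm_num

-- ===== VERDICT (by name: the statement is the Claim_ definition above) =====
theorem characterData_spec : Claim_equal_characterData := by
  intro xs _
  unfold Spec_characterData
  rw [pv_A_eq_target, pv_B_eq_target]
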